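-- pv_equiv track=rewrite | github.com/chenjm1747/supersonic | temp/insert_entities.py | extract_create_table_blocks
-- ===== SOURCE A (Python) =====
-- def extract_create_table_blocks(sql_content):
--     blocks = []
--     lines = sql_content.split('\n')
--     current_block = []
--
--     for line in lines:
--         if 'CREATE TABLE' in line:
--             if current_block:
--                 blocks.append('\n'.join(current_block))
--             current_block = [line]
--         elif current_block:
--             current_block.append(line)
--             if line.strip() == ');':
--                 blocks.append('\n'.join(current_block))
--                 current_block = []
--
--     if current_block:
--         blocks.append('\n'.join(current_block))
--
--     return blocks
-- ===== SOURCE B (Python) =====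
-- def extract_create_table_blocks(sql_content):
--     blocks = []
--     it = iter(sql_content.split('\n'))
--     head = next(it, None)
--     while head is not None:
--         if 'CREATE TABLE' not in head:
--             head = next(it, None)
--             continue
--         body = []
--         nxt = next(it, None)
--         while nxt is not None and 'CREATE TABLE' not in nxt:
--             body.append(nxt)
--             if nxt.strip() == ');':
--                 nxt = next(it, None)
--                 break
--             nxt = next(it, None)
--         blocks.append('\n'.join([head] + body))
--         head = nxt
--     return blocks
-- ===== Notes on version B (the rewrite author's own statement) =====
-- stated objective: alternative
-- what changed: A's single flat fold with a current_block accumulator and flush conditions is replaced by a nested-reader decomposition: an outer loop that advances a shared line iterator to each CREATE TABLE header and an inner loop that consumes that block's body lines until the closing line or the next header.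
import Mathlib
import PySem

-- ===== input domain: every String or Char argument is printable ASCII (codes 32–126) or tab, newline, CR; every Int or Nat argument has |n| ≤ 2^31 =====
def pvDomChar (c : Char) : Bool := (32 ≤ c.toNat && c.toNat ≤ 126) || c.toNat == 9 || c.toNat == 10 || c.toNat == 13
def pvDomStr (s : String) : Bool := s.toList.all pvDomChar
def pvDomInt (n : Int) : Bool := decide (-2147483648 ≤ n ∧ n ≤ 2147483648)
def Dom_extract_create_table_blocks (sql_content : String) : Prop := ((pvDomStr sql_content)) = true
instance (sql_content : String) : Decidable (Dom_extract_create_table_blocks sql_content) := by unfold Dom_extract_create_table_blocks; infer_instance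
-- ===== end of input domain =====

-- B replaces A's flat accumulator state machine by a nested-reader decomposition
-- (outer loop finds each CREATE TABLE header, inner loop consumes its body); objective: alternative.

-- ===== PORT A =====
-- A: single foldl over the lines with state (blocks, current_block), flush on CREATE TABLE / ');' / EOF.
def extract_create_table_blocks (sql_content : String) : List String :=
  let lines := (PySem.Str.split? sql_content "\n").getD []
  let st := lines.foldl (fun (st : List String × List String) line =>
    if PySem.Str.isIn "CREATE TABLE" line then
      ((if st.2.isEmpty then st.1 else st.1 ++ [PySem.Str.join "\n" st.2]), [line])
    else if !st.2.isEmpty then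
      let cur := st.2 ++ [line]
      if PySem.Str.strip line == ");" then (st.1 ++ [PySem.Str.join "\n" cur], [])
      else (st.1, cur)
    else st) ([], [])
  if st.2.isEmpty then st.1 else st.1 ++ [PySem.Str.join "\n" st.2]

-- ===== PORT B =====
-- inner reader loop of Source B: consumes body lines from the iterator; returns
-- (body, the next pending head (None = exhausted), the remaining iterator).
def pvInner : List String → List String × Option String × List String
  | [] => ([], none, [])
  | x :: xs =>
    if PySem.Str.isIn "CREATE TABLE" x then ([], some x, xs)
    else if PySem.Str.strip x == ");" then ([x], xs.head?, xs.tail)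
    else
      let r := pvInner xs
      (x :: r.1, r.2.1, r.2.2)

theorem pvInner_measure (it : List String) :
    (pvInner it).2.2.length + (if (pvInner it).2.1.isSome then 1 else 0) ≤ it.length := by
  induction it with
  | nil => simp [pvInner]
  | cons x xs ih =>
    simp only [pvInner]
    split
    · simp
    · split
      · cases xs <;> simp
      · simpa using Nat.le_succ_of_le ih

-- outer loop of Source B: 'head' is the pending line from the iterator, 'it' the rest.
def pvOuter : Option String → List String → List String
  | none, _ => []
  | some h, it =>
    if PySem.Str.isIn "CREATE TABLE" h then
      let r := pvInner it
      PySem.Str.join "\n" (h :: r.1) :: pvOuter r.2.1 r.2.2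
    else pvOuter it.head? it.tail
termination_by h it => it.length + (if h.isSome then 1 else 0)
decreasing_by
  · have := pvInner_measure it
    simp only [Option.isSome_some, if_pos] at *
    omega
  · cases it <;> simp

def extract_create_table_blocks_alt (sql_content : String) : List String :=
  let lines := (PySem.Str.split? sql_content "\n").getD []
  pvOuter lines.head? lines.tail

-- ===== PRECONDITION & SPEC =====
def Spec_extract_create_table_blocks (sql_content : String) (out : List String) : Prop := out = extract_create_table_blocks_alt sql_content
instance (sql_content : String) (out : List String) : Decidable (Spec_extract_create_table_blocks sql_content out) := by unfold Spec_extract_create_table_blocks; infer_instance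

-- ===== CLAIM (what is proved, stated in full; the proofs are below) =====
def Claim_equal_extract_create_table_blocks : Prop := ∀ (sql_content : String), Dom_extract_create_table_blocks sql_content → Spec_extract_create_table_blocks sql_content (extract_create_table_blocks sql_content)

-- ===== LEMMAS AND PROOFS =====

-- A's fold, written as recursion over the remaining lines with the current block as state.
def procA : List String → List String → List String
  | cur, [] => if cur.isEmpty then [] else [PySem.Str.join "\n" cur]
  | cur, l :: ls =>
    if PySem.Str.isIn "CREATE TABLE" l then
      (if cur.isEmpty then [] else [PySem.Str.join "\n" cur]) ++ procA [l] ls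
    else if !cur.isEmpty then
      if PySem.Str.strip l == ");" then
        PySem.Str.join "\n" (cur ++ [l]) :: procA [] ls
      else procA (cur ++ [l]) ls
    else procA [] ls

theorem foldA_eq_procA (ls : List String) (blocks cur : List String) :
    (let st := ls.foldl (fun (st : List String × List String) line =>
      if PySem.Str.isIn "CREATE TABLE" line then
        ((if st.2.isEmpty then st.1 else st.1 ++ [PySem.Str.join "\n" st.2]), [line])
      else if !st.2.isEmpty then
        let cur := st.2 ++ [line]
        if PySem.Str.strip line == ");" then (st.1 ++ [PySem.Str.join "\n" cur], [])
        else (st.1, cur)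
      else st) (blocks, cur)
     if st.2.isEmpty then st.1 else st.1 ++ [PySem.Str.join "\n" st.2])
    = blocks ++ procA cur ls := by
  induction ls generalizing blocks cur with
  | nil =>
    simp only [List.foldl_nil, procA]
    split <;> simp
  | cons l ls ih =>
    simp only [List.foldl_cons, procA]
    split
    · rw [ih]
      split <;> simp
    · split
      · split
        · rw [ih]; simp
        · rw [ih]
      · rename_i h1 h2
        simp only [Bool.not_eq_true'] at h2
        have : cur = [] := by simpa [List.isEmpty_iff] using h2
        subst this
        rw [ih]

-- the mutual invariant: A's in-block state matches B's inner reader, A's idle state matches B's outer skip.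
theorem procA_eq_pvOuter (ls : List String) :
    (∀ cur : List String, cur ≠ [] →
        procA cur ls =
          PySem.Str.join "\n" (cur ++ (pvInner ls).1) :: pvOuter (pvInner ls).2.1 (pvInner ls).2.2)
    ∧ procA [] ls = pvOuter ls.head? ls.tail := by
  induction ls with
  | nil =>
    constructor
    · intro cur hcur
      simp [procA, pvInner, pvOuter, List.isEmpty_iff, hcur]
    · simp [procA, pvOuter]
  | cons l ls ih =>
    obtain ⟨ih1, ih2⟩ := ih
    cases hct : PySem.Str.isIn "CREATE TABLE" l with
    | true =>
      simp at hct
      have hblk : pvOuter (some l) ls = procA [l] ls := by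
        rw [ih1 [l] (by simp)]
        simp [pvOuter, hct]
      constructor
      · intro cur hcur
        simp [procA, pvInner, hct, List.isEmpty_iff, hcur, hblk]
      · simp [procA, hct, hblk]
    | false =>
      simp at hct
      have h2 : procA [] (l :: ls) = pvOuter (some l) ls := by
        have : pvOuter (some l) ls = pvOuter ls.head? ls.tail := by
          simp [pvOuter, hct]
        rw [this, ← ih2]
        simp [procA, hct]
      cases hsc : (PySem.Str.strip l == ");") with
      | true =>
        rw [beq_iff_eq] at hsc
        refine ⟨?_, by simpa using h2⟩
        intro cur hcur
        simp [procA, pvInner, hct, hsc, hcur, ih2]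
      | false =>
        rw [beq_eq_false_iff_ne] at hsc
        refine ⟨?_, by simpa using h2⟩
        intro cur hcur
        have hx := ih1 (cur ++ [l]) (by simp)
        simp [procA, pvInner, hct, hsc, hcur, hx]

-- ===== VERDICT (by name: the statement is the Claim_ definition above) =====
theorem extract_create_table_blocks_spec : Claim_equal_extract_create_table_blocks := by
  intro sql _
  unfold Spec_extract_create_table_blocks extract_create_table_blocks extract_create_table_blocks_alt
  rw [foldA_eq_procA]
  simpa using (procA_eq_pvOuter ((PySem.Str.split? sql "\n").getD [])).2
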